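-- pv_equiv track=rewrite | github.com/PhucNguyen12038/PythonLearning | School-works/sessions/session17/H3-Line of descent.py | find_line
-- ===== SOURCE A (Python) =====
-- def find_line(familytree, descendant, ancestor):
--
--     # Base case. If descendant is the same as ancestor,
--     # then the line consists of one individual only
--     # and we return an one-element list.
--     if descendant == ancestor:
--         return [descendant]
--
--     # If the descendant exists in the dictionary, then it is possible that
--     # there exists a line of decent through his/her parents.
--     if descendant in familytree:
--
--         # Check all parents of the descendant in the dictionary
--         for parent in familytree[descendant]:
--
--             # Try to find the line from the parent to the ancestor
--             line = find_line(familytree, parent, ancestor)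
--
--             # If found, then add the descendant at the beginning of the line
--             # and return the line
--             if line != []:
--                 return [descendant] + line
--
--     # If we reach this point, then all seaches were unsuccessful
--     # and we return empty list
--     return []
-- ===== SOURCE B (Python) =====
-- def find_line(familytree, descendant, ancestor):
--     # Memoized depth-first search (dynamic programming over the DAG) instead of
--     # A's naive exponential recursion: each node's line of descent is computed
--     # once and cached; a node is marked with [] on entry, so a parent cycle is
--     # treated as a dead end instead of recursing forever.  Same first-parent
--     # selection rule, so the returned line is identical to A's wherever A returns.
--     memo = {}
--
--     def walk(node):
--         if node == ancestor:
--             return [node]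
--         if node in memo:
--             return memo[node]
--         memo[node] = []  # in-progress marker: a cycle back here is a dead end
--         line = []
--         for parent in familytree.get(node, []):
--             sub = walk(parent)
--             if sub:
--                 line = [node] + sub
--                 break
--         memo[node] = line
--         return line
--
--     return walk(descendant)
-- ===== Notes on version B (the rewrite author's own statement) =====
-- stated objective: alternative
-- what changed: replaces A's naive recursive depth-first search (which re-explores shared ancestors) by a memoized DFS over the parent DAG: each node's line is computed once and cached, with an in-progress marker so cycles become dead ends, keeping A's first-parent selection rule
-- outside the precondition, e.g. on find_line({'a': ['x', 'c'], 'c': ['c', 'x']}, 'a', 'x'): A returns ['a', 'x'], B returns ['a', 'x']; on find_line({'a': ['a']}, 'a', 'b'): A raises RecursionError, B returns []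
import Mathlib
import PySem

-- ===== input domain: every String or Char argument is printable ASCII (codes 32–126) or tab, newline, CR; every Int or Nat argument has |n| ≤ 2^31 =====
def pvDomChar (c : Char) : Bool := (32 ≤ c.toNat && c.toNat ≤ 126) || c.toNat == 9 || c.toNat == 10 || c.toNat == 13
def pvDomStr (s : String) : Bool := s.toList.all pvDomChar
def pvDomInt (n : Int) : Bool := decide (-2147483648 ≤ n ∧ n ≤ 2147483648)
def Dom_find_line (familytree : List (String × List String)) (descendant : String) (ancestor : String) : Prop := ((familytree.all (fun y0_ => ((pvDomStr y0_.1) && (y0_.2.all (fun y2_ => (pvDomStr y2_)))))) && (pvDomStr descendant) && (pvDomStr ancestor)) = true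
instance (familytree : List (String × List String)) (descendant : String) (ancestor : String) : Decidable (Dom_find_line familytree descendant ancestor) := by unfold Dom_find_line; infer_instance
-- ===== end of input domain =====

-- B replaces A's naive recursive depth-first search by a memoized DFS (each node's line
-- computed once and cached, same first-parent rule); equivalence is proved on the inputs
-- with no parent cycle reachable from the descendant.

-- dict lookup (first match), shared by both ports
def lookupFT (t : List (String × List String)) (x : String) : Option (List String) :=
  (t.find? (fun pr => pr.1 == x)).map (·.2)

-- ===== PORT A =====
-- A's recursion can diverge (cyclic familytree), so the port carries a fuel counter;
-- under Pre_find_line the fuel familytree.length + 2 is proved sufficient, and the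
-- `none` (fuel exhausted) branch of the wrapper is unreachable.
mutual
def goA (t : List (String × List String)) (anc : String) : Nat → String → Option (List String)
  | 0, _ => none
  | Nat.succ f, d =>
    if d = anc then some [d]
    else match lookupFT t d with
      | none => some []
      | some ps => loopA t anc f d ps
  termination_by f _ => (f, 0)
def loopA (t : List (String × List String)) (anc : String) : Nat → String → List String → Option (List String)
  | _, _, [] => some []
  | f, d, p :: ps =>
    match goA t anc f p with
    | none => none
    | some line => if line = [] then loopA t anc f d ps else some (d :: line)
  termination_by f _ ps => (f, ps.length + 1)
end

def find_line (familytree : List (String × List String)) (descendant : String) (ancestor : String) : List String :=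
  match goA familytree ancestor (familytree.length + 2) descendant with
  | some r => r
  | none => []

-- ===== PORT B =====
-- B's Python (memoized walk) terminates on every input (each call either returns at once
-- or adds a memo entry before recursing); the port still carries a fuel counter as a
-- structural-termination guard, and under Pre_find_line the fuel familytree.length + 2
-- is proved sufficient (the fuel-out branch is unreachable there).
mutual
-- `def walk(node): …` threading the memo dict through; returns (line, memo)
def walkB (t : List (String × List String)) (anc : String) :
    Nat → PySem.Dict String (List String) → String → List String × PySem.Dict String (List String)
  | 0, m, _ => ([], m)
  | Nat.succ f, m, node =>
    if node = anc then ([node], m)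
    else match m.get? node with
      | some v => (v, m)
      | none =>
        -- memo[node] = [] (in-progress marker), then the for-loop over familytree.get(node, [])
        let r := loopB t anc f (m.insert node []) node ((lookupFT t node).getD [])
        (r.1, r.2.insert node r.1)
  termination_by f _ _ => (f, 0)
-- `for parent in …: sub = walk(parent); if sub: line = [node] + sub; break`
def loopB (t : List (String × List String)) (anc : String) :
    Nat → PySem.Dict String (List String) → String → List String →
    List String × PySem.Dict String (List String)
  | _, m, _, [] => ([], m)
  | f, m, node, p :: ps =>
    let r := walkB t anc f m p
    if r.1 = [] then loopB t anc f r.2 node ps else (node :: r.1, r.2)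
  termination_by f _ _ ps => (f, ps.length + 1)
end

def find_line_alt (familytree : List (String × List String)) (descendant : String) (ancestor : String) : List String :=
  (walkB familytree ancestor (familytree.length + 2) PySem.Dict.empty descendant).1

-- ===== PRECONDITION & SPEC =====
-- reachability closure of the parent relation, used only to state acyclicity
def parsF (t : List (String × List String)) (x : String) : Finset String :=
  ((lookupFT t x).getD []).toFinset
def expandF (t : List (String × List String)) (s : Finset String) : Finset String :=
  s ∪ s.biUnion (parsF t)
def numNodes (t : List (String × List String)) : Nat := (t.map (fun pr => pr.2.length)).sum + 1
def reachF (t : List (String × List String)) (x : String) : Finset String :=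
  (expandF t)^[numNodes t] (parsF t x)

-- Pre_ excludes the inputs on which a parent cycle is reachable from the descendant: there
-- A's unbounded recursion can hit Python's recursion limit (RecursionError); whether A still
-- returns on such an input (an earlier parent succeeding before the cycle is scanned) depends
-- on the scan order and is not a closed-form input condition, and on every such input where A
-- does return, B returns the identical value (see the cited examples).
def Pre_find_line (familytree : List (String × List String)) (descendant : String) (ancestor : String) : Prop :=
  ∀ y ∈ reachF familytree descendant, y ∉ reachF familytree y
instance (familytree : List (String × List String)) (descendant : String) (ancestor : String) : Decidable (Pre_find_line familytree descendant ancestor) := by unfold Pre_find_line; infer_instance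

def pvWitness_find_line : (List (String × List String)) × String × String :=
  ([("a", ["b"]), ("b", ["c", "d"])], "a", "c")

def Spec_find_line (familytree : List (String × List String)) (descendant : String) (ancestor : String) (out : List String) : Prop := out = find_line_alt familytree descendant ancestor
instance (familytree : List (String × List String)) (descendant : String) (ancestor : String) (out : List String) : Decidable (Spec_find_line familytree descendant ancestor out) := by unfold Spec_find_line; infer_instance

-- ===== CLAIM (what is proved, stated in full; the proofs are below) =====
def Claim_equal_find_line : Prop := ∀ (familytree : List (String × List String)) (descendant : String) (ancestor : String), Dom_find_line familytree descendant ancestor → Pre_find_line familytree descendant ancestor → Spec_find_line familytree descendant ancestor (find_line familytree descendant ancestor)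

-- ===== LEMMAS AND PROOFS =====

-- proof-only helpers
def keysF (t : List (String × List String)) : Finset String := (t.map (·.1)).toFinset
def uniF (t : List (String × List String)) : Finset String :=
  t.foldr (fun pr acc => pr.2.toFinset ∪ acc) ∅
def muF (t : List (String × List String)) (x : String) : Nat :=
  ((reachF t x) ∩ keysF t).card
-- A's semantic value with full fuel, and the semantic first-parent scan
def avalA (t : List (String × List String)) (anc x : String) : List String :=
  (goA t anc (t.length + 2) x).getD []
def sScanA (t : List (String × List String)) (anc x : String) : List String → List String
  | [] => []
  | p :: ps => if avalA t anc p = [] then sScanA t anc x ps else x :: avalA t anc p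
-- memo invariant: every cached entry is either in-progress (on the stack E) or A's value
def GoodMemo (t : List (String × List String)) (anc : String) (E : List String)
    (memo : PySem.Dict String (List String)) : Prop :=
  ∀ k v, memo.get? k = some v → k ∈ E ∨ goA t anc (t.length + 2) k = some v

theorem lookup_mem {t : List (String × List String)} {x : String} {ps : List String}
    (h : lookupFT t x = some ps) : (x, ps) ∈ t := by
  unfold lookupFT at h
  cases hf : t.find? (fun pr => pr.1 == x) with
  | none => rw [hf] at h; simp at h
  | some pr =>
    rw [hf] at h
    have hm := List.mem_of_find?_eq_some hf
    have hp := List.find?_some hf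
    obtain ⟨a, b⟩ := pr
    simp at h hp
    subst hp; subst h; exact hm

theorem mem_uni {t : List (String × List String)} {pr : String × List String}
    (h : pr ∈ t) : pr.2.toFinset ⊆ uniF t := by
  induction t with
  | nil => simp at h
  | cons q rest ih =>
    rcases List.mem_cons.mp h with h | h
    · subst h; exact Finset.subset_union_left
    · exact (ih h).trans Finset.subset_union_right

theorem pars_subset_uni (t : List (String × List String)) (x : String) :
    parsF t x ⊆ uniF t := by
  unfold parsF
  cases hl : lookupFT t x with
  | none => simp
  | some ps => simpa using mem_uni (lookup_mem hl)

theorem expand_subset_uni {t : List (String × List String)} {s : Finset String}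
    (h : s ⊆ uniF t) : expandF t s ⊆ uniF t := by
  unfold expandF
  apply Finset.union_subset h
  apply Finset.biUnion_subset.mpr
  intro y _; exact pars_subset_uni t y

theorem card_uni_lt (t : List (String × List String)) : (uniF t).card < numNodes t := by
  unfold numNodes
  induction t with
  | nil => simp [uniF]
  | cons pr rest ih =>
    simp only [uniF, List.foldr, List.map, List.sum_cons] at *
    have h1 : (pr.2.toFinset ∪ rest.foldr (fun (qr : String × List String) acc => qr.2.toFinset ∪ acc) ∅).card ≤
        pr.2.toFinset.card + (rest.foldr (fun (qr : String × List String) acc => qr.2.toFinset ∪ acc) ∅).card :=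
      Finset.card_union_le _ _
    have h2 : pr.2.toFinset.card ≤ pr.2.length := List.toFinset_card_le _
    omega

theorem subset_iterate (t : List (String × List String)) (s : Finset String) :
    ∀ n, s ⊆ (expandF t)^[n] s := by
  intro n
  induction n with
  | zero => simp
  | succ n ih =>
    rw [Function.iterate_succ_apply']
    exact ih.trans Finset.subset_union_left

theorem iterate_subset_uni {t : List (String × List String)} {s : Finset String}
    (h : s ⊆ uniF t) : ∀ n, (expandF t)^[n] s ⊆ uniF t := by
  intro n
  induction n with
  | zero => simpa
  | succ n ih => rw [Function.iterate_succ_apply']; exact expand_subset_uni ih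

theorem sat_aux (t : List (String × List String)) (s : Finset String) :
    ∀ n, expandF t ((expandF t)^[n] s) = (expandF t)^[n] s ∨
      n ≤ ((expandF t)^[n] s).card := by
  intro n
  induction n with
  | zero => right; omega
  | succ n ih =>
    rcases ih with h | h
    · left; rw [Function.iterate_succ_apply', h, h]
    · by_cases hfix : expandF t ((expandF t)^[n] s) = (expandF t)^[n] s
      · left; rw [Function.iterate_succ_apply', hfix, hfix]
      · right
        rw [Function.iterate_succ_apply']
        have hsub : (expandF t)^[n] s ⊆ expandF t ((expandF t)^[n] s) :=
          Finset.subset_union_left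
        have : ((expandF t)^[n] s).card < (expandF t ((expandF t)^[n] s)).card :=
          Finset.card_lt_card (HasSubset.Subset.ssubset_of_ne hsub (fun he => hfix he.symm))
        omega

theorem reach_fixpoint (t : List (String × List String)) (x : String) :
    expandF t (reachF t x) = reachF t x := by
  rcases sat_aux t (parsF t x) (numNodes t) with h | h
  · exact h
  · exfalso
    have h1 : (expandF t)^[numNodes t] (parsF t x) ⊆ uniF t :=
      iterate_subset_uni (pars_subset_uni t x) _
    have h2 := Finset.card_le_card h1
    have h3 := card_uni_lt t
    omega

theorem closed_iterate {t : List (String × List String)} {T s : Finset String}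
    (hT : ∀ y ∈ T, parsF t y ⊆ T) (h0 : s ⊆ T) : ∀ n, (expandF t)^[n] s ⊆ T := by
  intro n
  induction n with
  | zero => simpa
  | succ n ih =>
    rw [Function.iterate_succ_apply']
    apply Finset.union_subset ih
    apply Finset.biUnion_subset.mpr
    intro y hy; exact hT y (ih hy)

theorem par_mem_reach {t : List (String × List String)} {x p : String} {ps : List String}
    (hx : lookupFT t x = some ps) (hp : p ∈ ps) : p ∈ reachF t x := by
  apply subset_iterate t (parsF t x) (numNodes t)
  simp [parsF, hx, hp]

theorem pars_subset_reach {t : List (String × List String)} {x y : String}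
    (hy : y ∈ reachF t x) : parsF t y ⊆ reachF t x := by
  intro z hz
  rw [← reach_fixpoint t x]
  exact Finset.mem_union_right _ (Finset.mem_biUnion.mpr ⟨y, hy, hz⟩)

theorem reach_trans {t : List (String × List String)} {x y : String}
    (hy : y ∈ reachF t x) : reachF t y ⊆ reachF t x :=
  closed_iterate (fun _ hz => pars_subset_reach hz) (pars_subset_reach hy) _

-- pars x ⊆ reach d0 propagates to the whole reachability closure of x
theorem reach_sub {t : List (String × List String)} {d0 x : String}
    (hxr : parsF t x ⊆ reachF t d0) : reachF t x ⊆ reachF t d0 :=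
  closed_iterate (fun _ hz => pars_subset_reach hz) hxr _

theorem key_mem_keys {t : List (String × List String)} {p : String} {qs : List String}
    (h : lookupFT t p = some qs) : p ∈ keysF t := by
  unfold keysF
  have := lookup_mem h
  simp only [List.mem_toFinset, List.mem_map]
  exact ⟨(p, qs), this, rfl⟩

theorem mu_lt {t : List (String × List String)} {x p : String} {ps qs : List String}
    (hnp : p ∉ reachF t p)
    (hx : lookupFT t x = some ps) (hp : p ∈ ps) (hpk : lookupFT t p = some qs) :
    muF t p < muF t x := by
  apply Finset.card_lt_card
  have hpr : p ∈ reachF t x := par_mem_reach hx hp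
  have hsub : reachF t p ∩ keysF t ⊆ reachF t x ∩ keysF t :=
    Finset.inter_subset_inter_right (reach_trans hpr)
  refine ⟨hsub, fun hcon => ?_⟩
  have : p ∈ reachF t p ∩ keysF t := hcon (Finset.mem_inter.mpr ⟨hpr, key_mem_keys hpk⟩)
  exact hnp (Finset.mem_inter.mp this).1

theorem mu_le (t : List (String × List String)) (x : String) : muF t x ≤ t.length := by
  unfold muF
  calc ((reachF t x) ∩ keysF t).card ≤ (keysF t).card :=
        Finset.card_le_card Finset.inter_subset_right
    _ ≤ (t.map (·.1)).length := List.toFinset_card_le _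
    _ = t.length := List.length_map ..

-- goA on a non-key node is immediate
theorem goA_nonkey {t : List (String × List String)} {p : String} (anc : String) (f : Nat)
    (h : lookupFT t p = none) :
    goA t anc (f + 1) p = some (if p = anc then [p] else []) := by
  rw [goA]
  by_cases hpa : p = anc
  · simp [hpa]
  · simp [hpa, h]

-- fuel stability and totality of goA under acyclicity
theorem goA_stab (t : List (String × List String)) (anc d0 : String)
    (pre : ∀ y ∈ reachF t d0, y ∉ reachF t y) :
    ∀ m x f g, parsF t x ⊆ reachF t d0 → muF t x < m → muF t x + 2 ≤ f → muF t x + 2 ≤ g →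
      goA t anc f x = goA t anc g x ∧ ∃ v, goA t anc f x = some v := by
  intro m
  induction m with
  | zero => intro x f g _ h; omega
  | succ m ih =>
    intro x f g hxr hm hf hg
    cases f with
    | zero => omega
    | succ f =>
    cases g with
    | zero => omega
    | succ g =>
    by_cases hxa : x = anc
    · rw [goA, goA, if_pos hxa, if_pos hxa]
      exact ⟨rfl, _, rfl⟩
    · cases hl : lookupFT t x with
      | none =>
        rw [goA, goA, if_neg hxa, if_neg hxa, hl]
        exact ⟨rfl, _, rfl⟩
      | some ps =>
        rw [goA, goA, if_neg hxa, if_neg hxa, hl]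
        have Hloop : ∀ (sub : List String), (∀ p ∈ sub, p ∈ ps) →
            loopA t anc f x sub = loopA t anc g x sub ∧ ∃ v, loopA t anc f x sub = some v := by
          intro sub
          induction sub with
          | nil => intro _; rw [loopA, loopA]; exact ⟨rfl, _, rfl⟩
          | cons p rest ihsub =>
            intro hsub
            have hpmem : p ∈ ps := hsub p (List.mem_cons_self ..)
            have hpr : p ∈ reachF t x := par_mem_reach hl hpmem
            have hprd : p ∈ reachF t d0 := reach_sub hxr hpr
            have hppars : parsF t p ⊆ reachF t d0 := pars_subset_reach hprd
            have hkey : goA t anc f p = goA t anc g p ∧ ∃ v, goA t anc f p = some v := by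
              cases hpk : lookupFT t p with
              | none =>
                cases f with
                | zero => omega
                | succ f' =>
                cases g with
                | zero => omega
                | succ g' =>
                rw [goA_nonkey anc f' hpk, goA_nonkey anc g' hpk]
                exact ⟨rfl, _, rfl⟩
              | some qs =>
                have hnp : p ∉ reachF t p := pre p hprd
                have hmu : muF t p < muF t x := mu_lt hnp hl hpmem hpk
                exact ih p f g hppars (by omega) (by omega) (by omega)
            obtain ⟨heq, v, hv⟩ := hkey
            rw [loopA, loopA, hv, ← heq, hv]
            simp only []
            by_cases hve : v = []
            · rw [if_pos hve, if_pos hve]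
              exact ihsub (fun q hq => hsub q (List.mem_cons_of_mem _ hq))
            · rw [if_neg hve, if_neg hve]
              exact ⟨rfl, _, rfl⟩
        exact Hloop ps (fun p hp => hp)

-- one-step recurrence of A's full-fuel value on a key node
theorem goA_rec (t : List (String × List String)) (anc d0 : String)
    (pre : ∀ y ∈ reachF t d0, y ∉ reachF t y)
    {x : String} {ps : List String} (hxr : parsF t x ⊆ reachF t d0)
    (hxa : x ≠ anc) (hl : lookupFT t x = some ps) :
    goA t anc (t.length + 2) x = some (sScanA t anc x ps) := by
  rw [goA, if_neg hxa, hl]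
  have Hloop : ∀ (sub : List String), (∀ p ∈ sub, p ∈ ps) →
      loopA t anc (t.length + 1) x sub = some (sScanA t anc x sub) := by
    intro sub
    induction sub with
    | nil => intro _; rw [loopA]; rfl
    | cons p rest ihsub =>
      intro hsub
      have hpmem : p ∈ ps := hsub p (List.mem_cons_self ..)
      have hpr : p ∈ reachF t x := par_mem_reach hl hpmem
      have hprd : p ∈ reachF t d0 := reach_sub hxr hpr
      have hppars : parsF t p ⊆ reachF t d0 := pars_subset_reach hprd
      have hp1 : goA t anc (t.length + 1) p = some (avalA t anc p) := by
        cases hpk : lookupFT t p with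
        | none =>
          rw [goA_nonkey anc t.length hpk]
          unfold avalA
          rw [goA_nonkey anc (t.length + 1) hpk]
          rfl
        | some qs =>
          have hnp : p ∉ reachF t p := pre p hprd
          have hmu : muF t p < muF t x := mu_lt hnp hl hpmem hpk
          have hmx : muF t x ≤ t.length := mu_le t x
          obtain ⟨heq, v, hv⟩ := goA_stab t anc d0 pre (muF t p + 1) p (t.length + 1)
            (t.length + 2) hppars (by omega) (by omega) (by omega)
          unfold avalA
          rw [hv, ← heq, hv]
          rfl
      rw [loopA, hp1]
      simp only []
      by_cases hav : avalA t anc p = []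
      · rw [if_pos hav, ihsub (fun q hq => hsub q (List.mem_cons_of_mem _ hq))]
        rw [sScanA, if_pos hav]
      · rw [if_neg hav, sScanA, if_neg hav]
  exact Hloop ps (fun p hp => hp)

-- the memoized walk on a non-key node is immediate
theorem walk_nonkey (t : List (String × List String)) (anc : String) {p : String}
    (hpk : lookupFT t p = none) (f : Nat) (E : List String)
    (memo : PySem.Dict String (List String))
    (hGood : GoodMemo t anc E memo) (hpE : p ∉ E) :
    (walkB t anc (f + 1) memo p).1 = avalA t anc p ∧
    GoodMemo t anc E (walkB t anc (f + 1) memo p).2 := by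
  rw [walkB]
  by_cases hpa : p = anc
  · rw [if_pos hpa]
    have hg : goA t anc (t.length + 2) p = some [p] := by rw [goA, if_pos hpa]
    refine ⟨?_, hGood⟩
    unfold avalA; rw [hg]; rfl
  · rw [if_neg hpa]
    cases hget : memo.get? p with
    | some v =>
      simp only []
      rcases hGood p v hget with hE | hcorr
      · exact absurd hE hpE
      · refine ⟨?_, hGood⟩
        unfold avalA; rw [hcorr]; rfl
    | none =>
      have hgv : goA t anc (t.length + 2) p = some [] := by
        rw [goA_nonkey anc (t.length + 1) hpk, if_neg hpa]
      simp only [hpk, Option.getD_none, loopB]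
      refine ⟨?_, ?_⟩
      · unfold avalA; rw [hgv]; rfl
      · intro k v hk
        rw [PySem.Dict.insert_insert_self, PySem.Dict.get?_insert] at hk
        by_cases hkp : k = p
        · rw [if_pos hkp] at hk
          injection hk with hv
          right; rw [hkp, hgv, ← hv]
        · rw [if_neg hkp] at hk
          exact hGood k v hk

-- the main correspondence: the memoized walk computes A's value and preserves the memo invariant
theorem walk_main (t : List (String × List String)) (anc d0 : String)
    (pre : ∀ y ∈ reachF t d0, y ∉ reachF t y) :
    ∀ m x f (E : List String) memo,
      parsF t x ⊆ reachF t d0 → x ∉ reachF t x → muF t x < m → muF t x + 2 ≤ f →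
      (∀ y ∈ E, y ≠ x ∧ y ∉ reachF t x) →
      GoodMemo t anc E memo →
      (walkB t anc f memo x).1 = avalA t anc x ∧
      GoodMemo t anc E (walkB t anc f memo x).2 := by
  intro m
  induction m with
  | zero => intro x f E memo _ _ h; omega
  | succ m ih =>
    intro x f E memo hxr hnx hm hf hE hGood
    cases f with
    | zero => omega
    | succ f =>
    cases f with
    | zero => omega
    | succ f2 =>
    rw [walkB]
    by_cases hxa : x = anc
    · rw [if_pos hxa]
      refine ⟨?_, hGood⟩
      have hg : goA t anc (t.length + 2) x = some [x] := by rw [goA, if_pos hxa]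
      unfold avalA; rw [hg]; rfl
    · rw [if_neg hxa]
      cases hget : memo.get? x with
      | some v =>
        simp only []
        rcases hGood x v hget with hxE | hcorr
        · exact absurd rfl (hE x hxE).1
        · refine ⟨?_, hGood⟩; unfold avalA; rw [hcorr]; rfl
      | none =>
        simp only []
        cases hl : lookupFT t x with
        | none =>
          have hgv : goA t anc (t.length + 2) x = some [] := by
            rw [goA_nonkey anc (t.length + 1) hl, if_neg hxa]
          simp only [Option.getD_none, loopB]
          refine ⟨?_, ?_⟩
          · unfold avalA; rw [hgv]; rfl
          · intro k v hk
            rw [PySem.Dict.insert_insert_self, PySem.Dict.get?_insert] at hk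
            by_cases hkp : k = x
            · rw [if_pos hkp] at hk
              injection hk with hv
              right; rw [hkp, hgv, ← hv]
            · rw [if_neg hkp] at hk
              exact hGood k v hk
        | some ps =>
          have hGood1 : GoodMemo t anc (x :: E) (memo.insert x []) := by
            intro k v hk
            rw [PySem.Dict.get?_insert] at hk
            by_cases hkp : k = x
            · left; rw [hkp]; exact List.mem_cons_self ..
            · rw [if_neg hkp] at hk
              rcases hGood k v hk with h | h
              · exact Or.inl (List.mem_cons_of_mem _ h)
              · exact Or.inr h
          have Hloop : ∀ (sub : List String), (∀ p ∈ sub, p ∈ ps) →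
              ∀ mm, GoodMemo t anc (x :: E) mm →
              (loopB t anc (f2 + 1) mm x sub).1 = sScanA t anc x sub ∧
              GoodMemo t anc (x :: E) (loopB t anc (f2 + 1) mm x sub).2 := by
            intro sub
            induction sub with
            | nil => intro _ mm hmm; rw [loopB]; exact ⟨rfl, hmm⟩
            | cons p rest ihsub =>
              intro hsub mm hmm
              have hpmem : p ∈ ps := hsub p (List.mem_cons_self ..)
              have hpr : p ∈ reachF t x := par_mem_reach hl hpmem
              have hprd : p ∈ reachF t d0 := reach_sub hxr hpr
              have hppars : parsF t p ⊆ reachF t d0 := pars_subset_reach hprd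
              have hpE : ∀ y ∈ x :: E, y ≠ p ∧ y ∉ reachF t p := by
                intro y hy
                rcases List.mem_cons.mp hy with hy | hy
                · subst hy
                  refine ⟨fun h => hnx (h ▸ hpr), fun h => hnx (reach_trans hpr h)⟩
                · obtain ⟨h1, h2⟩ := hE y hy
                  exact ⟨fun h => h2 (h ▸ hpr), fun h => h2 (reach_trans hpr h)⟩
              have hwalk : (walkB t anc (f2 + 1) mm p).1 = avalA t anc p ∧
                  GoodMemo t anc (x :: E) (walkB t anc (f2 + 1) mm p).2 := by
                cases hpk : lookupFT t p with
                | none =>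
                  exact walk_nonkey t anc hpk f2 (x :: E) mm hmm (fun h => (hpE p h).1 rfl)
                | some qs =>
                  have hnp : p ∉ reachF t p := pre p hprd
                  have hmu : muF t p < muF t x := mu_lt hnp hl hpmem hpk
                  exact ih p (f2 + 1) (x :: E) mm hppars hnp (by omega) (by omega) hpE hmm
              obtain ⟨hw1, hw2⟩ := hwalk
              rw [loopB]
              rw [hw1]
              by_cases hav : avalA t anc p = []
              · rw [if_pos hav]
                have hres := ihsub (fun q hq => hsub q (List.mem_cons_of_mem _ hq))
                  (walkB t anc (f2 + 1) mm p).2 hw2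
                rw [sScanA, if_pos hav]
                exact hres
              · rw [if_neg hav, sScanA, if_neg hav]
                exact ⟨rfl, hw2⟩
          have hrec := goA_rec t anc d0 pre hxr hxa hl
          simp only [Option.getD_some]
          obtain ⟨h1, h2⟩ := Hloop ps (fun p hp => hp) (memo.insert x []) hGood1
          refine ⟨?_, ?_⟩
          · rw [h1]; unfold avalA; rw [hrec]; rfl
          · intro k v hk
            rw [PySem.Dict.get?_insert] at hk
            by_cases hkp : k = x
            · rw [if_pos hkp] at hk
              injection hk with hv
              right; rw [hkp, hrec, ← hv, h1]
            · rw [if_neg hkp] at hk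
              rcases h2 k v hk with hkE | hcorr
              · rcases List.mem_cons.mp hkE with h | h
                · exact absurd h hkp
                · exact Or.inl h
              · exact Or.inr hcorr

theorem final_eq (t : List (String × List String)) (d anc : String)
    (pre : ∀ y ∈ reachF t d, y ∉ reachF t y) :
    find_line t d anc = find_line_alt t d anc := by
  have hnx : d ∉ reachF t d := fun h => pre d h h
  have hxr : parsF t d ⊆ reachF t d := subset_iterate t (parsF t d) (numNodes t)
  have hmu : muF t d ≤ t.length := mu_le t d
  obtain ⟨h1, _⟩ := walk_main t anc d pre (muF t d + 1) d (t.length + 2) [] PySem.Dict.empty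
    hxr hnx (by omega) (by omega) (by intro y hy; simp at hy)
    (by intro k v hk; rw [PySem.Dict.get?_empty] at hk; cases hk)
  unfold find_line find_line_alt
  rw [h1]
  unfold avalA
  cases hg : goA t anc (t.length + 2) d <;> rfl

-- ===== VERDICT (by name: the statement is the Claim_ definition above) =====
theorem find_line_spec : Claim_equal_find_line := by
  intro t d anc _ hpre
  unfold Spec_find_line
  exact final_eq t d anc hpre
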